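-- pv_equiv track=rewrite | github.com/PID1381/downloadcenter | scripts/anime/ricerca_scheda_anime.py | _filter_by_relevance
-- ===== SOURCE A (Python) =====
-- def _filter_by_relevance(results: list, query: str) -> list:
--     """
--     Rimuove i falsi positivi: risultati il cui titolo non contiene
--     ne la query intera ne alcuna parola chiave (>= 3 char).
--     Scoring:
--       2 = query intera nel titolo (es. 'berserk' in 'Berserk')
--       1 = almeno una keyword nel titolo
--       0 = nessun match -> rimosso (falso positivo AnimeClick)
--     Se nessun risultato ha score > 0, restituisce lista originale.
--     """
--     if not results or not query:
--         return results
--     q_lower = query.strip().lower()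
--     q_words = [w for w in q_lower.split() if len(w) >= 3]
--
--     def _score(title: str) -> int:
--         t = title.lower()
--         if q_lower in t:
--             return 2
--         if q_words and any(w in t for w in q_words):
--             return 1
--         return 0
--
--     scored    = [(r, _score(r["title"])) for r in results]
--     has_match = any(s > 0 for _, s in scored)
--     if not has_match:
--         return results
--     filtered = [r for r, s in scored if s > 0]
--     filtered.sort(key=lambda r: _score(r["title"]), reverse=True)
--     return filtered
-- ===== SOURCE B (Python) =====
-- def _filter_by_relevance(results: list, query: str) -> list:
--     """Bucket partition instead of score/filter/sort: one pass appends each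
--     matching result to the full-match or keyword-match bucket, and the two
--     ordered buckets concatenated reproduce the stable score-descending order."""
--     if not results or not query:
--         return results
--     q_lower = query.strip().lower()
--     q_words = [w for w in q_lower.split() if len(w) >= 3]
--     bucket2 = []
--     bucket1 = []
--     for r in results:
--         t = r["title"].lower()
--         if q_lower in t:
--             bucket2.append(r)
--         elif any(w in t for w in q_words):
--             bucket1.append(r)
--     if not bucket2 and not bucket1:
--         return results
--     return bucket2 + bucket1
-- ===== Notes on version B (the rewrite author's own statement) =====
-- stated objective: simpler
-- what changed: Replaces the score-annotate/filter/stable-sort pipeline by a single pass that appends each result to a full-match or keyword-match bucket and returns bucket2+bucket1, which equals the stable descending sort because scores only take values 1 and 2.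
import Mathlib
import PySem

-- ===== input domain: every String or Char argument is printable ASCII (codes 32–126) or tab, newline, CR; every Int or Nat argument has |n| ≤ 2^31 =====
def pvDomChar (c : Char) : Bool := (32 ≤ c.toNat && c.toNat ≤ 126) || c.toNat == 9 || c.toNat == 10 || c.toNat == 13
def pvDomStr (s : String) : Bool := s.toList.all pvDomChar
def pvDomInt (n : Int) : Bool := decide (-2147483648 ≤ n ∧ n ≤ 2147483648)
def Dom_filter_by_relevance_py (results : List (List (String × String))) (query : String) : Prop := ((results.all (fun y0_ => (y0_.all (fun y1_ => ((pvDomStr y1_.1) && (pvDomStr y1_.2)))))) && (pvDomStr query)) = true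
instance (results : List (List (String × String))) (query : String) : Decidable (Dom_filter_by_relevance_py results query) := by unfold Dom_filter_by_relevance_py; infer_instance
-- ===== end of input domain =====

-- B replaces the score/filter/stable-sort pipeline by one bucket-partition pass (objective: simpler).

-- ===== PORT A =====
-- r["title"] (dict lookup, first match per the association-list convention)
def pvTitle (r : List (String × String)) : String :=
  ((PySem.Dict.mk r).get? "title").getD ""

-- A's inner _score
def pvScore (q_lower : String) (q_words : List String) (title : String) : Int :=
  let t := PySem.Str.lower title
  if PySem.Str.isIn q_lower t then 2
  else if !q_words.isEmpty && q_words.any (fun w => PySem.Str.isIn w t) then 1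
  else 0

def filter_by_relevance_py (results : List (List (String × String))) (query : String) : List (List (String × String)) :=
  if results.isEmpty || query.toList.isEmpty then results
  else
    let q_lower := PySem.Str.lower (PySem.Str.strip query)
    let q_words := (PySem.Str.split₀ q_lower).filter (fun w => 3 ≤ PySem.Str.len w)
    let scored := results.map (fun r => (r, pvScore q_lower q_words (pvTitle r)))
    if !(scored.any (fun p => 0 < p.2)) then results
    else
      let filtered := (scored.filter (fun p => 0 < p.2)).map (·.1)
      PySem.List.sorted filtered (fun r => pvScore q_lower q_words (pvTitle r)) true

-- ===== PORT B =====
def filter_by_relevance_py_alt (results : List (List (String × String))) (query : String) : List (List (String × String)) :=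
  if results.isEmpty || query.toList.isEmpty then results
  else
    let q_lower := PySem.Str.lower (PySem.Str.strip query)
    let q_words := (PySem.Str.split₀ q_lower).filter (fun w => 3 ≤ PySem.Str.len w)
    let buckets := results.foldl
      (fun (acc : List (List (String × String)) × List (List (String × String))) r =>
        let t := PySem.Str.lower (pvTitle r)
        if PySem.Str.isIn q_lower t then (acc.1 ++ [r], acc.2)
        else if q_words.any (fun w => PySem.Str.isIn w t) then (acc.1, acc.2 ++ [r])
        else acc)
      ([], [])
    if buckets.1.isEmpty && buckets.2.isEmpty then results
    else buckets.1 ++ buckets.2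

-- ===== PRECONDITION & SPEC =====
-- Pre_ excludes only the inputs on which the Python A raises KeyError: a nonempty query together
-- with some result dict that has no "title" key.
def Pre_filter_by_relevance_py (results : List (List (String × String))) (query : String) : Prop :=
  query.toList = [] ∨ ∀ r ∈ results, ((PySem.Dict.mk r).get? "title").isSome
instance (results : List (List (String × String))) (query : String) : Decidable (Pre_filter_by_relevance_py results query) := by unfold Pre_filter_by_relevance_py; infer_instance

def pvWitness_filter_by_relevance_py : (List (List (String × String))) × String :=
  ([[("title", "Berserk")], [("title", "Naruto")]], "berserk")

def Spec_filter_by_relevance_py (results : List (List (String × String))) (query : String) (out : List (List (String × String))) : Prop := out = filter_by_relevance_py_alt results query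
instance (results : List (List (String × String))) (query : String) (out : List (List (String × String))) : Decidable (Spec_filter_by_relevance_py results query out) := by unfold Spec_filter_by_relevance_py; infer_instance

-- ===== CLAIM (what is proved, stated in full; the proofs are below) =====
def Claim_equal_filter_by_relevance_py : Prop := ∀ (results : List (List (String × String))) (query : String), Dom_filter_by_relevance_py results query → Pre_filter_by_relevance_py results query → Spec_filter_by_relevance_py results query (filter_by_relevance_py results query)

-- ===== LEMMAS AND PROOFS =====

-- inserting x after a block it is not "before" and directly before the head of the rest
theorem insertBy_middle {α : Type} (before : α → α → Bool) (x : α) (as bs : List α)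
    (ha : ∀ y ∈ as, before x y = false)
    (hb : ∀ b t, bs = b :: t → before x b = true) :
    PySem.List.insertBy before x (as ++ bs) = as ++ x :: bs := by
  induction as with
  | nil =>
    cases bs with
    | nil => simp [PySem.List.insertBy]
    | cons b t => simp [PySem.List.insertBy, hb b t rfl]
  | cons a as ih =>
    have hfa : before x a = false := ha a (by simp)
    simp only [List.cons_append, PySem.List.insertBy, hfa]
    simp [ih (fun y hy => ha y (by simp [hy]))]

-- the reverse stable insertion sort of a {1,2}-keyed list is the 2-bucket then the 1-bucket
theorem foldl_insertBy_buckets {α : Type} (key : α → Int) (fs : List α)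
    (h : ∀ x ∈ fs, key x = 1 ∨ key x = 2) :
    ∀ t2 t1 : List α, (∀ y ∈ t2, key y = 2) → (∀ y ∈ t1, key y = 1) →
      fs.foldl (fun acc x => PySem.List.insertBy (fun a b => decide (key b < key a)) x acc) (t2 ++ t1)
        = (t2 ++ fs.filter (fun x => key x = 2)) ++ (t1 ++ fs.filter (fun x => key x = 1)) := by
  induction fs with
  | nil => intro t2 t1 _ _; simp
  | cons x fs ih =>
    intro t2 t1 h2 h1
    rcases h x (by simp) with hx | hx
    · have hins : PySem.List.insertBy (fun a b => decide (key b < key a)) x (t2 ++ t1)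
          = t2 ++ (t1 ++ [x]) := by
        rw [PySem.List.insertBy_of_forall_not_before]
        · simp
        · intro y hy
          rcases List.mem_append.mp hy with hy | hy
          · show decide (key y < key x) = false
            rw [h2 y hy, hx]; decide
          · show decide (key y < key x) = false
            rw [h1 y hy, hx]; decide
      simp only [List.foldl_cons, hins]
      rw [ih (fun z hz => h z (by simp [hz])) t2 (t1 ++ [x]) h2
          (by intro y hy; rcases List.mem_append.mp hy with hy | hy
              · exact h1 y hy
              · simp at hy; simp [hy, hx])]
      simp [hx]
    · have hins : PySem.List.insertBy (fun a b => decide (key b < key a)) x (t2 ++ t1)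
          = (t2 ++ [x]) ++ t1 := by
        rw [insertBy_middle _ _ t2 t1]
        · simp
        · intro y hy
          show decide (key y < key x) = false
          rw [h2 y hy, hx]; decide
        · intro b t hbt
          have hb : key b = 1 := h1 b (by rw [hbt]; exact List.mem_cons_self ..)
          show decide (key b < key x) = true
          rw [hb, hx]; decide
      simp only [List.foldl_cons, hins]
      rw [ih (fun z hz => h z (by simp [hz])) (t2 ++ [x]) t1
          (by intro y hy; rcases List.mem_append.mp hy with hy | hy
              · exact h2 y hy
              · simp at hy; simp [hy, hx]) h1]
      simp [hx]

-- B's one-pass fold computes the two filters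
theorem foldl_buckets {α : Type} (p2 p1 : α → Bool) (l : List α) :
    ∀ b2 b1 : List α,
      l.foldl (fun (acc : List α × List α) r =>
          if p2 r then (acc.1 ++ [r], acc.2)
          else if p1 r then (acc.1, acc.2 ++ [r])
          else acc) (b2, b1)
        = (b2 ++ l.filter p2, b1 ++ l.filter (fun r => !p2 r && p1 r)) := by
  induction l with
  | nil => intro b2 b1; simp
  | cons x l ih =>
    intro b2 b1
    by_cases h2 : p2 x
    · simp [List.foldl_cons, h2, ih]
    · by_cases h1 : p1 x
      · simp [List.foldl_cons, h2, h1, ih]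
      · simp [List.foldl_cons, h2, h1, ih]

-- abstract core: A's score/filter/stable-reverse-sort equals B's bucket partition
theorem bucket_equiv {α : Type} (s : α → Int) (p2 p1 : α → Bool)
    (hscore : ∀ r, s r = if p2 r then 2 else if p1 r then 1 else 0)
    (results : List α) :
    (if !((results.map (fun r => (r, s r))).any (fun p => decide (0 < p.2))) then results
     else PySem.List.sorted
       (((results.map (fun r => (r, s r))).filter (fun p => decide (0 < p.2))).map (·.1)) s true)
    = (if ((results.filter p2).isEmpty && (results.filter (fun r => !p2 r && p1 r)).isEmpty) then results
       else results.filter p2 ++ results.filter (fun r => !p2 r && p1 r)) := by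
  have he2 : ∀ r, decide (s r = 2) = p2 r := by
    intro r; rw [hscore r]
    by_cases h2 : p2 r <;> by_cases h1 : p1 r <;> simp [h2, h1]
  have he1 : ∀ r, decide (s r = 1) = (!p2 r && p1 r) := by
    intro r; rw [hscore r]
    by_cases h2 : p2 r <;> by_cases h1 : p1 r <;> simp [h2, h1]
  have hepos : ∀ r, decide (0 < s r) = (p2 r || (!p2 r && p1 r)) := by
    intro r; rw [hscore r]
    by_cases h2 : p2 r <;> by_cases h1 : p1 r <;> simp [h2, h1]
  have hanyE : (results.map (fun r => (r, s r))).any (fun p => decide (0 < p.2))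
      = results.any (fun r => p2 r || (!p2 r && p1 r)) := by
    rw [List.any_map]
    refine congrArg (List.any results) (funext fun r => ?_)
    exact hepos r
  rw [hanyE]
  by_cases hm : results.any (fun r => p2 r || (!p2 r && p1 r))
  · have hne : results.filter p2 ≠ [] ∨ results.filter (fun r => !p2 r && p1 r) ≠ [] := by
      rcases List.any_eq_true.mp hm with ⟨r, hr, hor⟩
      rcases Bool.or_eq_true_iff.mp hor with h | h
      · left; exact List.ne_nil_of_mem (List.mem_filter.mpr ⟨hr, h⟩)
      · right; exact List.ne_nil_of_mem (List.mem_filter.mpr ⟨hr, h⟩)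
    have hbe : ((results.filter p2).isEmpty && (results.filter (fun r => !p2 r && p1 r)).isEmpty) = false := by
      rcases hne with h | h
      · rw [List.isEmpty_eq_false_iff.mpr h]; rfl
      · rw [List.isEmpty_eq_false_iff.mpr h]; simp
    rw [hm, hbe]
    simp only [Bool.not_true, Bool.false_eq_true, if_false]
    have hfil : ((results.map (fun r => (r, s r))).filter (fun p => decide (0 < p.2))).map (·.1)
        = results.filter (fun r => decide (0 < s r)) := by
      simp [List.filter_map, List.map_map, Function.comp_def]
    rw [hfil, PySem.List.sorted_rev_eq_foldl_insertBy]
    have hfall : ∀ x ∈ results.filter (fun r => decide (0 < s r)), s x = 1 ∨ s x = 2 := by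
      intro x hx
      have hp := (List.mem_filter.mp hx).2
      rw [hepos x] at hp
      rcases Bool.or_eq_true_iff.mp hp with h | h
      · right; rw [hscore x]; simp [h]
      · left
        rcases Bool.and_eq_true_iff.mp h with ⟨ha, hb⟩
        simp only [Bool.not_eq_true'] at ha
        rw [hscore x]; simp [ha, hb]
    have hmain := foldl_insertBy_buckets s (results.filter (fun r => decide (0 < s r))) hfall [] []
      (by intro y hy; simp at hy) (by intro y hy; simp at hy)
    simp only [List.nil_append] at hmain
    rw [hmain]
    have hff2 : (results.filter (fun r => decide (0 < s r))).filter (fun x => decide (s x = 2))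
        = results.filter p2 := by
      rw [List.filter_filter]
      refine List.filter_congr ?_
      intro r _
      rw [he2 r, hepos r]
      by_cases h2 : p2 r <;> simp [h2]
    have hff1 : (results.filter (fun r => decide (0 < s r))).filter (fun x => decide (s x = 1))
        = results.filter (fun r => !p2 r && p1 r) := by
      rw [List.filter_filter]
      refine List.filter_congr ?_
      intro r _
      rw [he1 r, hepos r]
      by_cases h2 : p2 r <;> by_cases h1 : p1 r <;> simp [h2, h1]
    rw [hff2, hff1]
  · have hmf : (results.any fun r => p2 r || (!p2 r && p1 r)) = false := by
      cases hE : (results.any fun r => p2 r || (!p2 r && p1 r)) with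
      | false => rfl
      | true => exact absurd hE hm
    have hall := List.any_eq_false.mp hmf
    have hf2 : results.filter p2 = [] := by
      rw [List.filter_eq_nil_iff]
      intro r hr hpr
      exact hall r hr (by simp [hpr])
    have hf1 : results.filter (fun r => !p2 r && p1 r) = [] := by
      rw [List.filter_eq_nil_iff]
      intro r hr hpr
      exact hall r hr (by simp [hpr])
    rw [hmf, hf2, hf1]
    simp

-- A's _score in terms of the two bucket tests
theorem pvScore_eq (q_lower : String) (q_words : List String) (r : List (String × String)) :
    pvScore q_lower q_words (pvTitle r)
      = if PySem.Str.isIn q_lower (PySem.Str.lower (pvTitle r)) then 2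
        else if q_words.any (fun w => PySem.Str.isIn w (PySem.Str.lower (pvTitle r))) then 1
        else 0 := by
  have hband : (!q_words.isEmpty && q_words.any (fun w => PySem.Str.isIn w (PySem.Str.lower (pvTitle r))))
      = q_words.any (fun w => PySem.Str.isIn w (PySem.Str.lower (pvTitle r))) := by
    cases q_words with
    | nil => simp
    | cons a l => simp
  simp only [pvScore, hband]

-- ===== VERDICT (by name: the statement is the Claim_ definition above) =====
set_option maxHeartbeats 1000000 in
theorem filter_by_relevance_py_spec : Claim_equal_filter_by_relevance_py := by
  intro results query _ _
  unfold Spec_filter_by_relevance_py filter_by_relevance_py filter_by_relevance_py_alt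
  by_cases hguard : results.isEmpty || query.toList.isEmpty
  · simp [hguard]
  · simp only [hguard, Bool.false_eq_true, if_false]
    rw [foldl_buckets
      (fun r => PySem.Str.isIn (PySem.Str.lower (PySem.Str.strip query)) (PySem.Str.lower (pvTitle r)))
      (fun r => ((PySem.Str.split₀ (PySem.Str.lower (PySem.Str.strip query))).filter
        (fun w => 3 ≤ PySem.Str.len w)).any (fun w => PySem.Str.isIn w (PySem.Str.lower (pvTitle r))))
      results [] []]
    exact bucket_equiv
      (fun r => pvScore (PySem.Str.lower (PySem.Str.strip query))
        ((PySem.Str.split₀ (PySem.Str.lower (PySem.Str.strip query))).filter (fun w => 3 ≤ PySem.Str.len w))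
        (pvTitle r))
      (fun r => PySem.Str.isIn (PySem.Str.lower (PySem.Str.strip query)) (PySem.Str.lower (pvTitle r)))
      (fun r => ((PySem.Str.split₀ (PySem.Str.lower (PySem.Str.strip query))).filter
        (fun w => 3 ≤ PySem.Str.len w)).any (fun w => PySem.Str.isIn w (PySem.Str.lower (pvTitle r))))
      (fun r => pvScore_eq _ _ r)
      results
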